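-- pv_equiv track=rewrite | github.com/sanha-kil/AlgorithmStudy | 2021/06/pg_더맵게.py | solution
-- ===== SOURCE A (Python) =====
-- import heapq
--
-- def solution(scoville, k):
--   heap = []
--   for x in scoville:
--     heapq.heappush(heap, x)
--
--   answer = 0
--   while heap[0] < k:
--     try:
--       heapq.heappush(heap, heapq.heappop(heap) + (heapq.heappop(heap)*2))
--       answer+=1
--     except:
--       return -1
--
--   return answer
-- ===== SOURCE B (Python) =====
-- def solution(scoville, k):
--     pot = list(scoville)
--     answer = 0
--     while True:
--         a = min(pot)
--         if a >= k:
--             return answer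
--         if len(pot) == 1:
--             return -1
--         pot.remove(a)
--         b = min(pot)
--         pot.remove(b)
--         pot.append(a + 2 * b)
--         answer += 1
-- ===== Notes on version B (the rewrite author's own statement) =====
-- stated objective: alternative
-- what changed: B drops the binary heap entirely: it keeps the pot as an unordered plain list and each round selects the two smallest by fresh linear min() scans, removes them by value (list.remove) and appends the mix at the end, never maintaining any ordering or heap invariant; an explicit one-element check replaces A's try/except.
import Mathlib
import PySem

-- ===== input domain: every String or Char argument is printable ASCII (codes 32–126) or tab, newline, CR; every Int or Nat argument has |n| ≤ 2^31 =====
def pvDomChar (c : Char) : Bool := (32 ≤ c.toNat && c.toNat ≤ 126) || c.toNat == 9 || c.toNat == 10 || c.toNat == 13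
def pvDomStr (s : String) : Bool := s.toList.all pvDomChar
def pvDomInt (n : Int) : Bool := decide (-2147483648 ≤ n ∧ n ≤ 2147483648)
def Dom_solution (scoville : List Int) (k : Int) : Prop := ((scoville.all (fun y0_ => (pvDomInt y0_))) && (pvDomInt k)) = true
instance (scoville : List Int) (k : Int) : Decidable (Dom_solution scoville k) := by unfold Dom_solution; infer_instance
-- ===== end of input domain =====

-- B replaces A's binary heap with an unordered list scanned afresh for its two minima each
-- round (no heap, no ordering maintained); objective: alternative, not faster.

-- ===== PORT A =====
-- A uses the heapq library; its heappush/heappop (CPython's _siftdown/_siftup) are ported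
-- step for step below on List Int (index access via getD; every access is in range).
-- Loops are ported with an explicit fuel that is always sufficient (a totality guard only):
-- in _siftdown the position strictly decreases, so fuel = pos is enough; in _siftup it
-- strictly increases below the length, so fuel = len(heap) is enough; A's while loop
-- removes one element per iteration, so fuel = len(heap) is enough.

-- CPython heapq._siftdown(heap, startpos, pos): newitem = heap[pos] is read first and kept
-- in a variable; parents are shifted down while newitem < parent, then newitem is written.
def siftdownLoop (l : List Int) (start : Nat) (newitem : Int) (pos : Nat) (fuel : Nat) : List Int :=
  match fuel with
  | 0 => l.set pos newitem            -- unreachable with fuel ≥ pos unless pos = start = 0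
  | fuel + 1 =>
    if start < pos then
      let parentpos := (pos - 1) / 2
      let parent := l.getD parentpos 0
      if newitem < parent then
        siftdownLoop (l.set pos parent) start newitem parentpos fuel
      else l.set pos newitem
    else l.set pos newitem

-- CPython heapq._siftup descent loop: move the smaller child up until a leaf is reached;
-- returns the shifted list and the final hole position.
def siftupLoop (l : List Int) (pos : Nat) (fuel : Nat) : List Int × Nat :=
  match fuel with
  | 0 => (l, pos)                     -- unreachable with fuel ≥ len(l) - pos
  | fuel + 1 =>
    let endpos := l.length
    let childpos := 2 * pos + 1
    if childpos < endpos then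
      let rightpos := childpos + 1
      let cp := if rightpos < endpos ∧ ¬ (l.getD childpos 0 < l.getD rightpos 0) then rightpos
                else childpos
      siftupLoop (l.set pos (l.getD cp 0)) cp fuel
    else (l, pos)

-- CPython heapq._siftup(heap, pos): read newitem, descend to a leaf, write newitem there,
-- then _siftdown back up from that position (startpos = pos).
def siftup (l : List Int) (pos : Nat) : List Int :=
  let newitem := l.getD pos 0
  let r := siftupLoop l pos l.length
  siftdownLoop r.1 pos newitem r.2 r.2

-- heapq.heappush: append, then _siftdown(heap, 0, len(heap)-1).
def heappush (l : List Int) (x : Int) : List Int :=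
  siftdownLoop (l ++ [x]) 0 x l.length l.length

-- heapq.heappop: pop the last element; none = IndexError on an empty heap.
def heappop (l : List Int) : Option (Int × List Int) :=
  match l with
  | [] => none
  | _ :: _ =>
    let lastelt := l.getLast!
    let heap := l.dropLast
    if heap.isEmpty then some (lastelt, heap)
    else some (heap.getD 0 0, siftup (heap.set 0 lastelt) 0)

-- the while-loop of A: while heap[0] < k: pop two (the second pop may raise → -1), push back.
def loopA (k : Int) (fuel : Nat) (heap : List Int) (answer : Int) : Int :=
  match fuel with
  | 0 => -1       -- unreachable: each iteration shrinks the heap by one, fuel = len suffices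
  | fuel + 1 =>
    match heap with
    | [] => -1    -- unreachable under Pre_: Python raises IndexError at heap[0]
    | x :: xs =>
      if (x :: xs).getD 0 0 < k then
        match heappop (x :: xs) with
        | none => -1    -- unreachable: the heap is nonempty here
        | some (a, h1) =>
          match heappop h1 with
          | none => -1  -- second heappop raised IndexError; caught: return -1
          | some (b, h2) => loopA k fuel (heappush h2 (a + b * 2)) (answer + 1)
      else answer

def solution (scoville : List Int) (k : Int) : Int :=
  loopA k scoville.length (scoville.foldl (fun h x => heappush h x) []) 0

-- ===== PORT B =====
-- Python's min() over a nonempty int list: left fold keeping the first minimal value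
-- (the [] case is unreachable under Pre_: Python min raises ValueError there).
def pyMin (s : List Int) : Int :=
  match s with
  | [] => 0
  | x :: xs => xs.foldl (fun m y => if y < m then y else m) x

-- the while True loop of B over the unordered pot: compute a = min(pot) once, return
-- answer when a ≥ k; otherwise remove the two minima by value (first occurrence,
-- = list.remove) and append the mix; fuel = len(pot) suffices (one element fewer per turn).
def loopB (k : Int) (fuel : Nat) (pot : List Int) (answer : Int) : Int :=
  match fuel with
  | 0 => -1       -- unreachable: fuel = len suffices
  | fuel + 1 =>
    match pot with
    | [] => -1    -- unreachable under Pre_: Python min(pot) raises ValueError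
    | _ :: _ =>
      let a := pyMin pot
      if a ≥ k then answer
      else if pot.length = 1 then -1
      else
        let pot1 := pot.erase a
        let b := pyMin pot1
        let pot2 := pot1.erase b
        loopB k fuel (pot2 ++ [a + 2 * b]) (answer + 1)

def solution_alt (scoville : List Int) (k : Int) : Int :=
  loopB k scoville.length scoville 0

-- ===== PRECONDITION & SPEC =====
-- Pre_ excludes only the empty list, on which Python A raises an uncaught IndexError at heap[0]
-- (Python B raises ValueError at min(pot) there).
def Pre_solution (scoville : List Int) (k : Int) : Prop := scoville ≠ []
instance (scoville : List Int) (k : Int) : Decidable (Pre_solution scoville k) := by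
  unfold Pre_solution; infer_instance

def pvWitness_solution : List Int × Int := ([1, 2, 3, 9, 10, 12], 7)

def Spec_solution (scoville : List Int) (k : Int) (out : Int) : Prop := out = solution_alt scoville k
instance (scoville : List Int) (k : Int) (out : Int) : Decidable (Spec_solution scoville k out) := by
  unfold Spec_solution; infer_instance

-- ===== CLAIM (what is proved, stated in full; the proofs are below) =====
def Claim_equal_solution : Prop := ∀ (scoville : List Int) (k : Int), Dom_solution scoville k → Pre_solution scoville k → Spec_solution scoville k (solution scoville k)

-- ===== LEMMAS AND PROOFS =====

theorem getD_set (l : List Int) (p q : Nat) (v : Int) (hp : p < l.length) :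
    (l.set p v).getD q 0 = if q = p then v else l.getD q 0 := by
  rcases eq_or_ne q p with rfl | hne
  · simp [List.getD, hp]
  · simp [List.getD, List.getElem?_set, hne, hne.symm]

theorem multiset_set (l : List Int) (n : Nat) (v : Int) (h : n < l.length) :
    (↑(l.set n v) : Multiset Int) + {l.getD n 0} = (↑l : Multiset Int) + {v} := by
  induction l generalizing n with
  | nil => simp at h
  | cons a t ih =>
    cases n with
    | zero =>
      simp only [List.set, List.getD_cons_zero, ← Multiset.cons_coe]
      rw [add_comm, Multiset.singleton_add, add_comm, Multiset.singleton_add,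
        Multiset.cons_swap]
    | succ m =>
      simp only [List.set, List.getD_cons_succ, ← Multiset.cons_coe, Multiset.cons_add]
      rw [ih m (by simpa using h)]

theorem getD_dropLast (l : List Int) (q : Nat) (hq : q + 1 < l.length) :
    l.dropLast.getD q 0 = l.getD q 0 := by
  rw [List.getD_eq_getElem _ _ (by simp; omega), List.getD_eq_getElem _ _ (by omega)]
  simp [List.getElem_dropLast]

theorem getD_append_lt (l : List Int) (x : Int) (q : Nat) (hq : q < l.length) :
    (l ++ [x]).getD q 0 = l.getD q 0 := by
  simp [List.getD, List.getElem?_append_left hq]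

theorem coe_append_singleton (l : List Int) (x : Int) :
    (↑(l ++ [x]) : Multiset Int) = ↑l + {x} := by
  rw [← Multiset.coe_add]; rfl

-- the binary-heap invariant of heapq: every parent is ≤ its children
def IsHeap (l : List Int) : Prop :=
  ∀ i j : Nat, (j = 2 * i + 1 ∨ j = 2 * i + 2) → j < l.length → l.getD i 0 ≤ l.getD j 0

-- the chosen child in one step of the _siftup descent
def sucCp (l : List Int) (pos : Nat) : Nat :=
  if 2 * pos + 1 + 1 < l.length ∧ ¬ (l.getD (2 * pos + 1) 0 < l.getD (2 * pos + 1 + 1) 0)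
  then 2 * pos + 1 + 1 else 2 * pos + 1

theorem siftupLoop_succ (l : List Int) (pos f : Nat) :
    siftupLoop l pos (f + 1)
      = if 2 * pos + 1 < l.length
        then siftupLoop (l.set pos (l.getD (sucCp l pos) 0)) (sucCp l pos) f
        else (l, pos) := rfl

theorem siftdownLoop_succ (l : List Int) (s : Nat) (ni : Int) (pos f : Nat) :
    siftdownLoop l s ni pos (f + 1)
      = if s < pos
        then (if ni < l.getD ((pos - 1) / 2) 0
              then siftdownLoop (l.set pos (l.getD ((pos - 1) / 2) 0)) s ni ((pos - 1) / 2) f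
              else l.set pos ni)
        else l.set pos ni := rfl

theorem sucCp_bounds (l : List Int) (pos : Nat) (h : 2 * pos + 1 < l.length) :
    pos < sucCp l pos ∧ sucCp l pos < l.length
      ∧ (sucCp l pos = 2 * pos + 1 ∨ sucCp l pos = 2 * pos + 2) := by
  unfold sucCp
  split
  · rename_i hc
    have := hc.1
    exact ⟨by omega, by omega, by omega⟩
  · exact ⟨by omega, by omega, by omega⟩

theorem sucCp_min (l : List Int) (pos : Nat) (h : 2 * pos + 1 < l.length) :
    ∀ j, (j = 2 * pos + 1 ∨ j = 2 * pos + 2) → j < l.length → j ≠ sucCp l pos →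
      l.getD (sucCp l pos) 0 ≤ l.getD j 0 := by
  unfold sucCp
  split
  · rename_i hc
    intro j hj hjl hjne
    rcases hj with rfl | rfl
    · exact le_of_not_gt hc.2
    · exact absurd (by omega : (2 : Nat) * pos + 2 = 2 * pos + 1 + 1) (fun hq => hjne hq)
  · rename_i hc
    intro j hj hjl hjne
    rcases hj with rfl | rfl
    · exact absurd rfl hjne
    · rw [Classical.not_and_iff_not_or_not, not_not] at hc
      rcases hc with hc | hc
      · exact absurd (by omega) hc
      · exact le_of_lt hc

theorem length_siftdownLoop (fuel : Nat) : ∀ (l : List Int) (s : Nat) (ni : Int) (pos : Nat),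
    (siftdownLoop l s ni pos fuel).length = l.length := by
  induction fuel with
  | zero => intro l s ni pos; simp [siftdownLoop]
  | succ f ih =>
    intro l s ni pos
    rw [siftdownLoop_succ]
    split
    · split
      · rw [ih]; simp
      · simp
    · simp

theorem length_siftupLoop (fuel : Nat) : ∀ (l : List Int) (pos : Nat),
    (siftupLoop l pos fuel).1.length = l.length := by
  induction fuel with
  | zero => intro l pos; rfl
  | succ f ih =>
    intro l pos
    rw [siftupLoop_succ]
    split
    · rw [ih]; simp
    · rfl

theorem heappop_cons (x : Int) (xs : List Int) :
    heappop (x :: xs) = if (x :: xs).dropLast.isEmpty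
      then some ((x :: xs).getLast!, (x :: xs).dropLast)
      else some ((x :: xs).dropLast.getD 0 0,
                 siftup (((x :: xs).dropLast).set 0 ((x :: xs).getLast!)) 0) := rfl

theorem length_siftup (l : List Int) (pos : Nat) : (siftup l pos).length = l.length := by
  unfold siftup
  rw [length_siftdownLoop, length_siftupLoop]

theorem heappop_length {l : List Int} {a : Int} {l' : List Int}
    (h : heappop l = some (a, l')) : l'.length + 1 = l.length := by
  cases l with
  | nil =>
    rw [show heappop ([] : List Int) = none from rfl] at h
    cases h
  | cons x xs =>
    rw [heappop_cons] at h
    split at h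
    · rename_i he
      simp only [Option.some.injEq, Prod.mk.injEq] at h
      obtain ⟨-, rfl⟩ := h
      simp
    · simp only [Option.some.injEq, Prod.mk.injEq] at h
      obtain ⟨-, rfl⟩ := h
      rw [length_siftup]
      simp

theorem length_heappush (l : List Int) (x : Int) :
    (heappush l x).length = l.length + 1 := by
  unfold heappush
  rw [length_siftdownLoop]
  simp

theorem siftdownLoop_perm (fuel : Nat) : ∀ (l : List Int) (ni : Int) (pos : Nat),
    pos < l.length → pos ≤ fuel →
    (↑(siftdownLoop l 0 ni pos fuel) : Multiset Int) + {l.getD pos 0}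
      = (↑l : Multiset Int) + {ni} := by
  induction fuel with
  | zero =>
    intro l ni pos hpos _
    exact multiset_set l pos ni hpos
  | succ f ih =>
    intro l ni pos hpos hfuel
    rw [siftdownLoop_succ]
    split
    · rename_i h
      split
      · rename_i hni
        set pp := (pos - 1) / 2 with hppdef
        have hpp : pp < pos := by omega
        have hpplen : pp < l.length := lt_trans hpp hpos
        have hIH := ih (l.set pos (l.getD pp 0)) ni pp (by simpa using hpplen) (by omega)
        rw [getD_set l pos pp (l.getD pp 0) hpos, if_neg (by omega)] at hIH
        have hms := multiset_set l pos (l.getD pp 0) hpos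
        apply add_right_cancel (b := ({l.getD pp 0} : Multiset Int))
        calc (↑(siftdownLoop (l.set pos (l.getD pp 0)) 0 ni pp f) : Multiset Int)
              + {l.getD pos 0} + {l.getD pp 0}
            = (↑(siftdownLoop (l.set pos (l.getD pp 0)) 0 ni pp f) : Multiset Int)
              + {l.getD pp 0} + {l.getD pos 0} := by rw [add_right_comm]
          _ = (↑(l.set pos (l.getD pp 0)) : Multiset Int) + {ni} + {l.getD pos 0} := by rw [hIH]
          _ = (↑(l.set pos (l.getD pp 0)) : Multiset Int) + {l.getD pos 0} + {ni} := by
                rw [add_right_comm]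
          _ = (↑l : Multiset Int) + {l.getD pp 0} + {ni} := by rw [hms]
          _ = (↑l : Multiset Int) + {ni} + {l.getD pp 0} := by rw [add_right_comm]
      · exact multiset_set l pos ni hpos
    · exact multiset_set l pos ni hpos

theorem set_is_heap (l : List Int) (ni : Int) (pos : Nat) (hpos : pos < l.length)
    (ha : ∀ i j : Nat, (j = 2 * i + 1 ∨ j = 2 * i + 2) → j < l.length → i ≠ pos → j ≠ pos →
      l.getD i 0 ≤ l.getD j 0)
    (hb : ∀ j : Nat, (j = 2 * pos + 1 ∨ j = 2 * pos + 2) → j < l.length → ni ≤ l.getD j 0)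
    (hstop : 0 < pos → l.getD ((pos - 1) / 2) 0 ≤ ni) :
    IsHeap (l.set pos ni) := by
  intro i j hedge hj
  simp only [List.length_set] at hj
  rw [getD_set l pos i ni hpos, getD_set l pos j ni hpos]
  rcases eq_or_ne i pos with hi2 | hine
  · rw [if_pos hi2, if_neg (by omega)]
    exact hb j (by omega) hj
  · rcases eq_or_ne j pos with hj2 | hjne
    · rw [if_neg hine, if_pos hj2]
      have hieq : i = (pos - 1) / 2 := by omega
      rw [hieq]
      exact hstop (by omega)
    · rw [if_neg hine, if_neg hjne]
      exact ha i j hedge hj hine hjne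

theorem siftdownLoop_heap (fuel : Nat) : ∀ (l : List Int) (ni : Int) (pos : Nat),
    pos < l.length → pos ≤ fuel →
    (∀ i j : Nat, (j = 2 * i + 1 ∨ j = 2 * i + 2) → j < l.length → i ≠ pos → j ≠ pos →
      l.getD i 0 ≤ l.getD j 0) →
    (∀ j : Nat, (j = 2 * pos + 1 ∨ j = 2 * pos + 2) → j < l.length → ni ≤ l.getD j 0) →
    (∀ j : Nat, (j = 2 * pos + 1 ∨ j = 2 * pos + 2) → j < l.length → 0 < pos →
      l.getD ((pos - 1) / 2) 0 ≤ l.getD j 0) →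
    IsHeap (siftdownLoop l 0 ni pos fuel) := by
  induction fuel with
  | zero =>
    intro l ni pos hpos hfuel ha hb hc
    have hz : pos = 0 := by omega
    exact set_is_heap l ni pos hpos ha hb (by omega)
  | succ f ih =>
    intro l ni pos hpos hfuel ha hb hc
    rw [siftdownLoop_succ]
    split
    · rename_i h
      split
      · rename_i hni
        set pp := (pos - 1) / 2 with hppdef
        have hpplen : pp < l.length := by omega
        apply ih (l.set pos (l.getD pp 0)) ni pp (by simpa using hpplen) (by omega)
        · -- edges avoiding pp in l.set pos parent
          intro i j hedge hj hip hjp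
          simp only [List.length_set] at hj
          rw [getD_set l pos i (l.getD pp 0) hpos, getD_set l pos j (l.getD pp 0) hpos]
          rcases eq_or_ne i pos with hi2 | hine
          · rw [if_pos hi2, if_neg (by omega)]
            exact hc j (by omega) hj (by omega)
          · rcases eq_or_ne j pos with hj2 | hjne
            · exact absurd (by omega : i = pp) hip
            · rw [if_neg hine, if_neg hjne]
              exact ha i j hedge hj hine hjne
        · -- ni below the children of pp
          intro j hedge hj
          simp only [List.length_set] at hj
          rw [getD_set l pos j (l.getD pp 0) hpos]
          rcases eq_or_ne j pos with hj2 | hjne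
          · rw [if_pos hj2]; exact le_of_lt hni
          · rw [if_neg hjne]
            exact le_trans (le_of_lt hni) (ha pp j (by omega) hj (by omega) hjne)
        · -- the parent of pp still below the children of pp
          intro j hedge hj hppz
          simp only [List.length_set] at hj
          rw [getD_set l pos ((pp - 1) / 2) (l.getD pp 0) hpos, if_neg (by omega),
            getD_set l pos j (l.getD pp 0) hpos]
          have hqp : l.getD ((pp - 1) / 2) 0 ≤ l.getD pp 0 :=
            ha ((pp - 1) / 2) pp (by omega) hpplen (by omega) (by omega)
          rcases eq_or_ne j pos with hj2 | hjne
          · rw [if_pos hj2]; exact hqp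
          · rw [if_neg hjne]
            exact le_trans hqp (ha pp j (by omega) hj (by omega) hjne)
      · rename_i hni
        refine set_is_heap l ni pos hpos ha (fun j hj hjl => hb j hj hjl) ?_
        intro _
        exact le_of_not_gt hni
    · rename_i h
      exact set_is_heap l ni pos hpos ha (fun j hj hjl => hb j hj hjl) (fun h0 => absurd h0 h)

theorem siftupLoop_pos (fuel : Nat) : ∀ (l : List Int) (pos : Nat),
    pos < l.length → l.length ≤ pos + fuel →
    pos ≤ (siftupLoop l pos fuel).2 ∧ (siftupLoop l pos fuel).2 < l.length ∧
      l.length ≤ 2 * (siftupLoop l pos fuel).2 + 1 := by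
  induction fuel with
  | zero =>
    intro l pos hpos hfuel
    exact ⟨le_refl _, hpos, by omega⟩
  | succ f ih =>
    intro l pos hpos hfuel
    rw [siftupLoop_succ]
    split
    · rename_i h
      obtain ⟨hc1, hc2, hc3⟩ := sucCp_bounds l pos h
      obtain ⟨i1, i2, i3⟩ := ih (l.set pos (l.getD (sucCp l pos) 0)) (sucCp l pos)
        (by simpa using hc2) (by simp only [List.length_set]; omega)
      simp only [List.length_set] at i1 i2 i3
      exact ⟨by omega, by omega, by omega⟩
    · rename_i h
      exact ⟨le_refl _, hpos, by omega⟩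

theorem siftupLoop_perm (fuel : Nat) : ∀ (l : List Int) (pos : Nat),
    pos < l.length → ∀ v : Int,
    (↑((siftupLoop l pos fuel).1.set (siftupLoop l pos fuel).2 v) : Multiset Int)
      = (↑(l.set pos v) : Multiset Int) := by
  induction fuel with
  | zero => intro l pos _ v; rfl
  | succ f ih =>
    intro l pos hpos v
    rw [siftupLoop_succ]
    split
    · rename_i h
      obtain ⟨hc1, hc2, hc3⟩ := sucCp_bounds l pos h
      rw [ih (l.set pos (l.getD (sucCp l pos) 0)) (sucCp l pos) (by simpa using hc2) v]
      have h1 := multiset_set (l.set pos (l.getD (sucCp l pos) 0)) (sucCp l pos) v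
        (by simpa using hc2)
      rw [getD_set l pos (sucCp l pos) (l.getD (sucCp l pos) 0) hpos, if_neg (by omega)] at h1
      have h2 := multiset_set l pos (l.getD (sucCp l pos) 0) hpos
      have h3 := multiset_set l pos v hpos
      apply add_right_cancel (b := ({l.getD pos 0} : Multiset Int))
      apply add_right_cancel (b := ({l.getD (sucCp l pos) 0} : Multiset Int))
      calc (↑((l.set pos (l.getD (sucCp l pos) 0)).set (sucCp l pos) v) : Multiset Int)
            + {l.getD pos 0} + {l.getD (sucCp l pos) 0}
          = ((↑((l.set pos (l.getD (sucCp l pos) 0)).set (sucCp l pos) v) : Multiset Int)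
            + {l.getD (sucCp l pos) 0}) + {l.getD pos 0} := by rw [add_right_comm]
        _ = ((↑(l.set pos (l.getD (sucCp l pos) 0)) : Multiset Int) + {v}) + {l.getD pos 0} := by
              rw [h1]
        _ = ((↑(l.set pos (l.getD (sucCp l pos) 0)) : Multiset Int) + {l.getD pos 0}) + {v} := by
              rw [add_right_comm]
        _ = ((↑l : Multiset Int) + {l.getD (sucCp l pos) 0}) + {v} := by rw [h2]
        _ = ((↑l : Multiset Int) + {v}) + {l.getD (sucCp l pos) 0} := by rw [add_right_comm]
        _ = ((↑(l.set pos v) : Multiset Int) + {l.getD pos 0}) + {l.getD (sucCp l pos) 0} := by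
              rw [h3]
    · rfl

theorem siftupLoop_inv (fuel : Nat) : ∀ (l : List Int) (pos : Nat),
    pos < l.length →
    (∀ i j : Nat, (j = 2 * i + 1 ∨ j = 2 * i + 2) → j < l.length → i ≠ pos → j ≠ pos →
      l.getD i 0 ≤ l.getD j 0) →
    (∀ j : Nat, (j = 2 * pos + 1 ∨ j = 2 * pos + 2) → j < l.length → 0 < pos →
      l.getD ((pos - 1) / 2) 0 ≤ l.getD j 0) →
    (∀ i j : Nat, (j = 2 * i + 1 ∨ j = 2 * i + 2) → j < l.length →
        i ≠ (siftupLoop l pos fuel).2 → j ≠ (siftupLoop l pos fuel).2 →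
        (siftupLoop l pos fuel).1.getD i 0 ≤ (siftupLoop l pos fuel).1.getD j 0) ∧
      (∀ j : Nat, (j = 2 * (siftupLoop l pos fuel).2 + 1 ∨ j = 2 * (siftupLoop l pos fuel).2 + 2) →
        j < l.length → 0 < (siftupLoop l pos fuel).2 →
        (siftupLoop l pos fuel).1.getD (((siftupLoop l pos fuel).2 - 1) / 2) 0
          ≤ (siftupLoop l pos fuel).1.getD j 0) := by
  induction fuel with
  | zero => exact fun l pos _ ha hc => ⟨ha, hc⟩
  | succ f ih =>
    intro l pos hpos ha hc
    rw [siftupLoop_succ]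
    split
    · rename_i h
      obtain ⟨hc1, hc2, hc3⟩ := sucCp_bounds l pos h
      have hkey := sucCp_min l pos h
      have ha' : ∀ i j : Nat, (j = 2 * i + 1 ∨ j = 2 * i + 2) →
          j < (l.set pos (l.getD (sucCp l pos) 0)).length → i ≠ sucCp l pos → j ≠ sucCp l pos →
          (l.set pos (l.getD (sucCp l pos) 0)).getD i 0
            ≤ (l.set pos (l.getD (sucCp l pos) 0)).getD j 0 := by
        intro i j hedge hj hicp hjcp
        simp only [List.length_set] at hj
        rw [getD_set l pos i (l.getD (sucCp l pos) 0) hpos,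
          getD_set l pos j (l.getD (sucCp l pos) 0) hpos]
        rcases eq_or_ne i pos with hi2 | hine
        · rw [if_pos hi2, if_neg (by omega)]
          exact hkey j (by omega) hj hjcp
        · rcases eq_or_ne j pos with hj2 | hjne
          · rw [if_neg hine, if_pos hj2]
            have hieq : i = (pos - 1) / 2 := by omega
            rw [hieq]
            exact hc (sucCp l pos) (by omega) hc2 (by omega)
          · rw [if_neg hine, if_neg hjne]
            exact ha i j hedge hj hine hjne
      have hc' : ∀ j : Nat, (j = 2 * sucCp l pos + 1 ∨ j = 2 * sucCp l pos + 2) →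
          j < (l.set pos (l.getD (sucCp l pos) 0)).length → 0 < sucCp l pos →
          (l.set pos (l.getD (sucCp l pos) 0)).getD ((sucCp l pos - 1) / 2) 0
            ≤ (l.set pos (l.getD (sucCp l pos) 0)).getD j 0 := by
        intro j hedge hj _hcpz
        simp only [List.length_set] at hj
        rw [getD_set l pos ((sucCp l pos - 1) / 2) (l.getD (sucCp l pos) 0) hpos,
          if_pos (by omega), getD_set l pos j (l.getD (sucCp l pos) 0) hpos,
          if_neg (by omega)]
        exact ha (sucCp l pos) j (by omega) hj (by omega) (by omega)
      obtain ⟨A1, A2⟩ := ih (l.set pos (l.getD (sucCp l pos) 0)) (sucCp l pos)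
        (by simpa using hc2) ha' hc'
      exact ⟨fun i j he hjl hic hjc => A1 i j he (by simpa using hjl) hic hjc,
        fun j he hjl h0 => A2 j he (by simpa using hjl) h0⟩
    · exact ⟨ha, hc⟩

theorem heap_root_min_idx (l : List Int) (hh : IsHeap l) :
    ∀ j, j < l.length → l.getD 0 0 ≤ l.getD j 0 := by
  intro j
  induction j using Nat.strong_induction_on with
  | _ j ih =>
    intro hj
    rcases Nat.eq_zero_or_pos j with rfl | hjpos
    · exact le_refl _
    · exact le_trans (ih ((j - 1) / 2) (by omega) (by omega))
        (hh ((j - 1) / 2) j (by omega) hj)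

theorem heap_root_min (l : List Int) (hh : IsHeap l) :
    ∀ y ∈ l, l.getD 0 0 ≤ y := by
  intro y hy
  obtain ⟨j, hj, rfl⟩ := List.mem_iff_getElem.mp hy
  rw [← List.getD_eq_getElem l 0 hj]
  exact heap_root_min_idx l hh j hj

theorem heappush_perm (l : List Int) (x : Int) :
    (↑(heappush l x) : Multiset Int) = (↑l : Multiset Int) + {x} := by
  have h := siftdownLoop_perm l.length (l ++ [x]) x l.length (by simp) (le_refl _)
  rw [show (l ++ [x]).getD l.length 0 = x from by simp [List.getD]] at h
  have h2 := add_right_cancel h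
  rw [show heappush l x = siftdownLoop (l ++ [x]) 0 x l.length l.length from rfl, h2,
    coe_append_singleton]

theorem heappush_heap (l : List Int) (x : Int) (hh : IsHeap l) : IsHeap (heappush l x) := by
  apply siftdownLoop_heap l.length (l ++ [x]) x l.length (by simp) (le_refl _)
  · intro i j hedge hj hine hjne
    simp only [List.length_append, List.length_cons, List.length_nil] at hj
    rw [getD_append_lt l x i (by omega), getD_append_lt l x j (by omega)]
    exact hh i j hedge (by omega)
  · intro j hedge hj
    simp only [List.length_append, List.length_cons, List.length_nil] at hj
    omega
  · intro j hedge hj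
    simp only [List.length_append, List.length_cons, List.length_nil] at hj
    omega

theorem heappop_spec (l : List Int) (hh : IsHeap l) (hne : l ≠ []) :
    ∃ l', heappop l = some (l.getD 0 0, l') ∧
      (↑l' : Multiset Int) + {l.getD 0 0} = (↑l : Multiset Int) ∧ IsHeap l' := by
  match l, hne with
  | x :: xs, _ =>
    rw [heappop_cons]
    by_cases he : (x :: xs).dropLast.isEmpty
    · have hxs : xs = [] := by
        have := congrArg List.length (List.isEmpty_iff.mp he)
        simpa using this
      subst hxs
      rw [if_pos he]
      refine ⟨[], ?_, by simp, ?_⟩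
      · rw [show ([x] : List Int).getLast! = x from rfl]
        rfl
      · intro i j _ hj
        simp at hj
    · rw [if_neg (by simpa using he)]
      have hxs : xs ≠ [] := by
        intro hq; subst hq; simp at he
      set heap := (x :: xs).dropLast with hheap
      set lastelt := (x :: xs).getLast! with hlast
      have hxl : 0 < xs.length := List.length_pos_iff.mpr hxs
      have hheaplen : heap.length = xs.length := by rw [hheap]; simp
      have hlpos : 0 < heap.length := by omega
      set l2 := heap.set 0 lastelt with hl2
      have hl2len : l2.length = heap.length := by rw [hl2]; simp
      have hl2len' : l2.length = xs.length := by omega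
      have hg0 : heap.getD 0 0 = x := by
        rw [hheap, getD_dropLast _ 0 (by simp; omega)]
        rfl
      have hhl2a : ∀ i j : Nat, (j = 2 * i + 1 ∨ j = 2 * i + 2) → j < l2.length →
          i ≠ 0 → j ≠ 0 → l2.getD i 0 ≤ l2.getD j 0 := by
        intro i j he2 hj hi0 hj0
        rw [hl2len] at hj
        rw [hl2, getD_set heap 0 i lastelt hlpos, if_neg hi0,
          getD_set heap 0 j lastelt hlpos, if_neg hj0,
          hheap, getD_dropLast _ i (by simp; omega), getD_dropLast _ j (by simp; omega)]
        exact hh i j he2 (by simp; omega)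
      have hr := siftupLoop_pos l2.length l2 0 (by omega) (by omega)
      have hrlen : (siftupLoop l2 0 l2.length).1.length = l2.length := length_siftupLoop _ _ _
      obtain ⟨A1, A2⟩ := siftupLoop_inv l2.length l2 0 (by omega) hhl2a
        (fun j _ _ h0 => absurd h0 (by omega))
      have hheapres : IsHeap (siftup l2 0) := by
        rw [show siftup l2 0 = siftdownLoop (siftupLoop l2 0 l2.length).1 0 (l2.getD 0 0)
            (siftupLoop l2 0 l2.length).2 (siftupLoop l2 0 l2.length).2 from rfl]
        apply siftdownLoop_heap _ _ _ _ (by rw [hrlen]; omega) (le_refl _)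
        · intro i j he2 hj hine hjne
          rw [hrlen] at hj
          exact A1 i j he2 hj hine hjne
        · intro j he2 hj
          rw [hrlen] at hj
          have := hr.2.2
          omega
        · intro j he2 hj h0
          rw [hrlen] at hj
          exact A2 j he2 hj h0
      have hv : l2.getD 0 0 = lastelt := by
        rw [hl2, getD_set heap 0 0 lastelt hlpos, if_pos rfl]
      have hperm : (↑(siftup l2 0) : Multiset Int) = ↑l2 := by
        rw [show siftup l2 0 = siftdownLoop (siftupLoop l2 0 l2.length).1 0 (l2.getD 0 0)
            (siftupLoop l2 0 l2.length).2 (siftupLoop l2 0 l2.length).2 from rfl]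
        have hp1 := siftdownLoop_perm (siftupLoop l2 0 l2.length).2 (siftupLoop l2 0 l2.length).1
          (l2.getD 0 0) (siftupLoop l2 0 l2.length).2 (by rw [hrlen]; omega) (le_refl _)
        have hp2 := multiset_set (siftupLoop l2 0 l2.length).1 (siftupLoop l2 0 l2.length).2
          (l2.getD 0 0) (by rw [hrlen]; omega)
        have hp3 := siftupLoop_perm l2.length l2 0 (by omega) (l2.getD 0 0)
        have hself : l2.set 0 (l2.getD 0 0) = l2 := by
          rw [hv, hl2, List.set_set]
        rw [hp3, hself] at hp2
        rw [← hp2] at hp1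
        exact add_right_cancel hp1
      refine ⟨siftup l2 0, by rw [hg0]; rfl, ?_, hheapres⟩
      rw [hperm]
      have h1 := multiset_set heap 0 lastelt hlpos
      have h2 : (↑heap : Multiset Int) + {lastelt} = ↑(x :: xs) := by
        rw [← coe_append_singleton]
        have hgl : lastelt = (x :: xs).getLast (by simp) := by
          rw [hlast, List.getLast!_eq_getLast?_getD,
            List.getLast?_eq_some_getLast (l := x :: xs) (by simp)]
          rfl
        rw [hheap, hgl, List.dropLast_append_getLast]
      rw [show ((x :: xs).getD 0 0) = heap.getD 0 0 from by rw [hg0]; rfl, h1, h2]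

-- pyMin's fold: the result is an element of acc :: xs and is ≤ all of them
theorem foldMin_spec (xs : List Int) : ∀ acc : Int,
    (xs.foldl (fun m y => if y < m then y else m) acc = acc
      ∨ xs.foldl (fun m y => if y < m then y else m) acc ∈ xs)
    ∧ xs.foldl (fun m y => if y < m then y else m) acc ≤ acc
    ∧ ∀ y ∈ xs, xs.foldl (fun m y => if y < m then y else m) acc ≤ y := by
  induction xs with
  | nil => intro acc; exact ⟨Or.inl rfl, le_refl _, by simp⟩
  | cons z zs ih =>
    intro acc
    simp only [List.foldl_cons]
    obtain ⟨hmem, hle, hall⟩ := ih (if z < acc then z else acc)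
    have hlez : zs.foldl (fun m y => if y < m then y else m) (if z < acc then z else acc) ≤ z := by
      rcases lt_or_ge z acc with h | h
      · simpa [h] using hle
      · rw [if_neg (not_lt.mpr h)] at hle ⊢; omega
    have hleacc : zs.foldl (fun m y => if y < m then y else m) (if z < acc then z else acc) ≤ acc := by
      rcases lt_or_ge z acc with h | h
      · rw [if_pos h] at hle; omega
      · simpa [not_lt.mpr h] using hle
    refine ⟨?_, hleacc, ?_⟩
    · rcases hmem with heq | hmem
      · rw [heq]
        rcases lt_or_ge z acc with h | h
        · rw [if_pos h]; exact Or.inr List.mem_cons_self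
        · rw [if_neg (not_lt.mpr h)]; exact Or.inl rfl
      · exact Or.inr (List.mem_cons_of_mem _ hmem)
    · intro y hy
      rcases List.mem_cons.mp hy with rfl | hy'
      · exact hlez
      · exact hall y hy'

theorem pyMin_mem (s : List Int) (hne : s ≠ []) : pyMin s ∈ s := by
  match s, hne with
  | x :: xs, _ =>
    obtain ⟨hmem, -, -⟩ := foldMin_spec xs x
    show xs.foldl (fun m y => if y < m then y else m) x ∈ x :: xs
    rcases hmem with heq | hmem
    · rw [heq]; exact List.mem_cons_self
    · exact List.mem_cons_of_mem _ hmem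

theorem pyMin_le (s : List Int) (hne : s ≠ []) : ∀ y ∈ s, pyMin s ≤ y := by
  match s, hne with
  | x :: xs, _ =>
    obtain ⟨-, hle, hall⟩ := foldMin_spec xs x
    intro y hy
    rcases List.mem_cons.mp hy with rfl | hy'
    · exact hle
    · exact hall y hy'

theorem erase_multiset (s : List Int) (a : Int) (ha : a ∈ s) :
    (↑(s.erase a) : Multiset Int) + {a} = (↑s : Multiset Int) := by
  have hp : List.Perm s (a :: s.erase a) := List.perm_cons_erase ha
  rw [Multiset.coe_eq_coe.mpr hp, ← Multiset.cons_coe, ← Multiset.singleton_add, add_comm]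

-- the minimum value is determined by the multiset: heap root = pyMin of any list with the
-- same multiset
theorem root_eq_pyMin (heap pot : List Int) (hh : IsHeap heap) (hne : heap ≠ [])
    (hms : (↑heap : Multiset Int) = (↑pot : Multiset Int)) :
    heap.getD 0 0 = pyMin pot := by
  have hpotne : pot ≠ [] := by
    intro hq; subst hq
    exact hne (by simpa using Multiset.coe_eq_zero heap |>.mp (by simpa using hms))
  have hmemiff : ∀ y : Int, y ∈ heap ↔ y ∈ pot := by
    intro y; rw [← Multiset.mem_coe, ← Multiset.mem_coe, hms]
  have hroot_mem : heap.getD 0 0 ∈ heap := by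
    match heap, hne with
    | x :: xs, _ => exact List.mem_cons_self
  have h1 : heap.getD 0 0 ≤ pyMin pot :=
    heap_root_min heap hh _ ((hmemiff _).mpr (pyMin_mem pot hpotne))
  have h2 : pyMin pot ≤ heap.getD 0 0 :=
    pyMin_le pot hpotne _ ((hmemiff _).mp hroot_mem)
  omega

theorem loop_eq (k : Int) (n : Nat) :
    ∀ (heap pot : List Int) (answer : Int), heap.length = n → IsHeap heap →
      (↑heap : Multiset Int) = (↑pot : Multiset Int) →
      loopA k n heap answer = loopB k n pot answer := by
  induction n with
  | zero => intro heap pot answer _ _ _; rfl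
  | succ m IH =>
    intro heap pot answer hlen hheap hms
    have hcard : heap.length = pot.length := by
      have := congrArg Multiset.card hms
      simpa using this
    cases heap with
    | nil => simp at hlen
    | cons x xs =>
      obtain ⟨a0, t, rfl⟩ : ∃ a0 t, pot = a0 :: t := by
        cases pot with
        | nil => simp at hcard
        | cons a0 t => exact ⟨a0, t, rfl⟩
      have hroot := root_eq_pyMin (x :: xs) (a0 :: t) hheap (by simp) hms
      show (match x :: xs with
        | [] => -1
        | x :: xs =>
          if (x :: xs).getD 0 0 < k then
            match heappop (x :: xs) with
            | none => -1
            | some (a, h1) =>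
              match heappop h1 with
              | none => -1
              | some (b, h2) => loopA k m (heappush h2 (a + b * 2)) (answer + 1)
          else answer)
        = (match a0 :: t with
        | [] => -1
        | _ :: _ =>
          let a := pyMin (a0 :: t)
          if a ≥ k then answer
          else if (a0 :: t).length = 1 then -1
          else
            let pot1 := (a0 :: t).erase a
            let b := pyMin pot1
            let pot2 := pot1.erase b
            loopB k m (pot2 ++ [a + 2 * b]) (answer + 1))
      dsimp only
      by_cases hbr : (x :: xs).getD 0 0 < k
      · rw [if_pos hbr, if_neg (by rw [← hroot]; omega)]
        obtain ⟨h1, hpop, hm1, hh1⟩ := heappop_spec (x :: xs) hheap (by simp)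
        rw [hpop]
        dsimp only
        -- the multiset after the first removal agrees on both sides
        have hamem : pyMin (a0 :: t) ∈ a0 :: t := pyMin_mem _ (by simp)
        have hms1 : (↑h1 : Multiset Int) = (↑((a0 :: t).erase (pyMin (a0 :: t))) : Multiset Int) := by
          apply add_right_cancel (b := ({(x :: xs).getD 0 0} : Multiset Int))
          rw [hm1, hms, hroot, erase_multiset _ _ hamem]
        have hl1 := heappop_length hpop
        by_cases hlen1 : (a0 :: t).length = 1
        · -- one element: A's second pop raises (caught → -1); B returns -1
          rw [if_pos hlen1]
          have hh1nil : h1 = [] := by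
            have : h1.length = 0 := by
              simp only [List.length_cons] at hlen1 hl1 hcard
              omega
            exact List.eq_nil_of_length_eq_zero this
          subst hh1nil
          rfl
        · rw [if_neg hlen1]
          have hh1ne : h1 ≠ [] := by
            intro hq
            have h0 : (0 : Nat) + 1 = (x :: xs).length := by rw [← hl1, hq]; rfl
            simp only [List.length_cons] at h0 hcard hlen1
            omega
          obtain ⟨h2, hpop2, hm2, hh2⟩ := heappop_spec h1 hh1 hh1ne
          rw [hpop2]
          dsimp only
          have hroot2 := root_eq_pyMin h1 ((a0 :: t).erase (pyMin (a0 :: t))) hh1 hh1ne hms1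
          have hbmem : pyMin ((a0 :: t).erase (pyMin (a0 :: t))) ∈ (a0 :: t).erase (pyMin (a0 :: t)) := by
            apply pyMin_mem
            intro hq
            rw [hq] at hms1
            exact hh1ne (by simpa using Multiset.coe_eq_zero h1 |>.mp (by simpa using hms1))
          have hms2 : (↑h2 : Multiset Int)
              = (↑(((a0 :: t).erase (pyMin (a0 :: t))).erase
                  (pyMin ((a0 :: t).erase (pyMin (a0 :: t))))) : Multiset Int) := by
            apply add_right_cancel (b := ({h1.getD 0 0} : Multiset Int))
            rw [hm2, hms1, hroot2, erase_multiset _ _ hbmem]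
          have hl2 := heappop_length hpop2
          have hfuel : (heappush h2 ((x :: xs).getD 0 0 + h1.getD 0 0 * 2)).length = m := by
            rw [length_heappush]
            simp only [List.length_cons] at hlen hl1 hl2
            omega
          apply IH _ _ _ hfuel (heappush_heap _ _ hh2)
          rw [heappush_perm, coe_append_singleton, hms2, hroot, hroot2]
          ring_nf
      · rw [if_neg hbr, if_pos (by rw [← hroot]; omega)]

theorem foldl_heappush_spec (scoville : List Int) :
    IsHeap (scoville.foldl (fun h x => heappush h x) []) ∧
      (↑(scoville.foldl (fun h x => heappush h x) []) : Multiset Int)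
        = (↑scoville : Multiset Int) := by
  have key : ∀ (sc acc : List Int), IsHeap acc →
      IsHeap (sc.foldl (fun h x => heappush h x) acc) ∧
        (↑(sc.foldl (fun h x => heappush h x) acc) : Multiset Int) = ↑acc + ↑sc := by
    intro sc
    induction sc with
    | nil => exact fun acc ha => ⟨ha, by simp⟩
    | cons y ys ih =>
      intro acc ha
      simp only [List.foldl_cons]
      obtain ⟨p, q⟩ := ih (heappush acc y) (heappush_heap _ _ ha)
      refine ⟨p, ?_⟩
      rw [q, heappush_perm, ← Multiset.cons_coe, ← Multiset.singleton_add, add_assoc]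
  obtain ⟨p, q⟩ := key scoville [] (fun i j _ hj => by simp at hj)
  refine ⟨p, ?_⟩
  rw [q]
  simp

-- ===== VERDICT (by name: the statement is the Claim_ definition above) =====
theorem solution_spec : Claim_equal_solution := by
  intro scoville k _ _hpre
  unfold Spec_solution solution solution_alt
  obtain ⟨hheap, hmult⟩ := foldl_heappush_spec scoville
  have hlen0 : (scoville.foldl (fun h x => heappush h x) []).length = scoville.length := by
    have := congrArg Multiset.card hmult
    simpa using this
  exact loop_eq k scoville.length _ _ 0 hlen0 hheap hmult
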